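-- pv_equiv track=rewrite | github.com/jcolinpatrick/kryptos | scripts/transposition/columnar/e_k4_keyword_double_columnar.py | columnar_keyword_decrypt
-- ===== SOURCE A (Python) =====
-- import math
-- from typing import Dict, List, Tuple
--
-- def keyword_to_col_order(keyword: str) -> List[int]:
--     """Convert keyword to column reading order (alphabetical rank of each letter)."""
--     kw = keyword.upper()
--     indexed = [(ch, i) for i, ch in enumerate(kw)]
--     ranked = sorted(indexed, key=lambda x: (x[0], x[1]))
--     order = [0] * len(kw)
--     for rank, (_, pos) in enumerate(ranked):
--         order[pos] = rank
--     return order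
--
-- def columnar_keyword_decrypt(ct_text: str, keyword: str) -> str:
--     """Undo keyword columnar transposition."""
--     width = len(keyword)
--     col_order = keyword_to_col_order(keyword)
--     length = len(ct_text)
--     nrows = math.ceil(length / width)
--     remainder = length % width
--
--     if remainder == 0:
--         col_lens = {c: nrows for c in range(width)}
--     else:
--         col_lens = {c: (nrows if c < remainder else nrows - 1) for c in range(width)}
--
--     grid = {}
--     ct_idx = 0
--     for rank in range(width):
--         col_idx = col_order.index(rank)
--         for r in range(col_lens[col_idx]):
--             if ct_idx < length:
--                 grid[(r, col_idx)] = ct_text[ct_idx]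
--                 ct_idx += 1
--
--     result = []
--     for r in range(nrows):
--         for c in range(width):
--             if (r, c) in grid:
--                 result.append(grid[(r, c)])
--
--     return "".join(result)
-- ===== SOURCE B (Python) =====
-- def columnar_keyword_decrypt(ct_text: str, keyword: str) -> str:
--     """Undo keyword columnar transposition (column-slice reconstruction)."""
--     width = len(keyword)
--     kw = keyword.upper()
--     # inverse permutation: perm[rank] = column position holding that rank
--     perm = sorted(range(width), key=lambda i: (kw[i], i))
--     nrows = -(-len(ct_text) // width)
--     remainder = len(ct_text) % width
--     cols = [""] * width
--     pos = 0
--     for c in perm: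
--         clen = nrows if (remainder == 0 or c < remainder) else nrows - 1
--         cols[c] = ct_text[pos:pos + clen]
--         pos += clen
--     return "".join(cols[c][r] for r in range(nrows) for c in range(width) if r < len(cols[c]))
-- ===== Notes on version B (the rewrite author's own statement) =====
-- stated objective: faster
-- what changed: B precomputes the inverse permutation with one key-sort and rebuilds each column as a whole contiguous slice of the ciphertext, then reads rows from the list of column strings, replacing A's per-rank col_order.index scan, per-cell (row,col)-keyed dict fill and dict-membership row read.
import Mathlib
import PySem

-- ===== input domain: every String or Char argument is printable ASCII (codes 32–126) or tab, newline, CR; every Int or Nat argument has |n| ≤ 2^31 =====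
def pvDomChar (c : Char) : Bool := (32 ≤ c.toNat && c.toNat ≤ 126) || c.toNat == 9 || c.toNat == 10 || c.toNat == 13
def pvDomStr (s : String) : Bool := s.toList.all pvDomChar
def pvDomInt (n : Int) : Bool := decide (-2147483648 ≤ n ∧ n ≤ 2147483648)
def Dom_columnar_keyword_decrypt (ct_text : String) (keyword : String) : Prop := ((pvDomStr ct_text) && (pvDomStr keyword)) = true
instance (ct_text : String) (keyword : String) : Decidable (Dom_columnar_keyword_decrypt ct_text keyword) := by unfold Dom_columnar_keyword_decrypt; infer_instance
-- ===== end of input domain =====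

-- B replaces A's per-cell dict fill (with its O(w) col_order.index scan per rank) by an inverse
-- permutation and whole contiguous column slices; objective: faster (measured).

-- ===== PORT A =====
-- helper: keyword_to_col_order (sorted key (x[0], x[1]) is Python's lexicographic tuple order = sorted2)
def keyword_to_col_order (keyword : String) : List Int :=
  let kw := (PySem.Str.upper keyword).toList
  let indexed := (PySem.List.enumerate kw).map (fun p => (p.2, p.1))
  let ranked := PySem.List.sorted2 indexed (fun x => x.1) (fun x => x.2)
  let order := List.replicate kw.length (0 : Int)
  (PySem.List.enumerate ranked).foldl (fun o q => PySem.List.pySetD o q.2.2 q.1) order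

def columnar_keyword_decrypt (ct_text : String) (keyword : String) : String :=
  let width : Int := PySem.Str.len keyword
  let col_order := keyword_to_col_order keyword
  let length : Int := PySem.Str.len ct_text
  -- math.ceil(length / width) — exact ceiling division (float division is exact at these sizes)
  let nrows : Int := -(PySem.Int.floordiv (-length) width)
  let remainder : Int := PySem.Int.mod length width
  let col_lens : PySem.Dict Int Int :=
    if remainder == 0 then
      (PySem.List.pyRange 0 width).foldl (fun d c => d.insert c nrows) PySem.Dict.empty
    else
      (PySem.List.pyRange 0 width).foldl
        (fun d c => d.insert c (if c < remainder then nrows else nrows - 1)) PySem.Dict.empty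
  let st :=
    (PySem.List.pyRange 0 width).foldl
      (fun (st : PySem.Dict (Int × Int) Char × Int) rank =>
        match PySem.List.index? col_order rank with
        | none => st  -- unreachable (Python ValueError): col_order is a permutation of 0..width-1
        | some colIdx =>
          -- col_lens[col_idx]: KeyError unreachable, getD 0; ct_text[ct_idx]: guard makes it in range, getD ' '
          (PySem.List.pyRange 0 (col_lens.getD (colIdx : Int) 0)).foldl
            (fun st r =>
              if st.2 < length then
                (st.1.insert (r, (colIdx : Int)) ((PySem.Str.pyGet? ct_text st.2).getD ' '), st.2 + 1)
              else st)
            st)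
      (PySem.Dict.empty, 0)
  let grid := st.1
  String.ofList <|
    (PySem.List.pyRange 0 nrows).foldl
      (fun acc r =>
        (PySem.List.pyRange 0 width).foldl
          (fun acc c =>
            match grid.get? (r, c) with
            | some ch => acc ++ [ch]
            | none => acc)
          acc)
      []

-- ===== PORT B =====
def columnar_keyword_decrypt_alt (ct_text : String) (keyword : String) : String :=
  let width : Int := PySem.Str.len keyword
  let kw := (PySem.Str.upper keyword).toList
  -- sorted(range(width), key=lambda i: (kw[i], i)) — tuple key = sorted2; kw[i] in range, getD ' '
  let perm := PySem.List.sorted2 (PySem.List.pyRange 0 width)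
      (fun i => PySem.List.pyGetD kw i ' ') (fun i => i)
  let nrows : Int := -(PySem.Int.floordiv (-(PySem.Str.len ct_text)) width)
  let remainder : Int := PySem.Int.mod (PySem.Str.len ct_text) width
  let st :=
    perm.foldl
      (fun (st : List (List Char) × Int) c =>
        let clen : Int := if remainder == 0 || c < remainder then nrows else nrows - 1
        (PySem.List.pySetD st.1 c (PySem.List.slice ct_text.toList (some st.2) (some (st.2 + clen))),
         st.2 + clen))
      (List.replicate width.toNat ([] : List Char), 0)
  let cols := st.1
  String.ofList <|
    (PySem.List.pyRange 0 nrows).foldl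
      (fun acc r =>
        (PySem.List.pyRange 0 width).foldl
          (fun acc c =>
            let col := PySem.List.pyGetD cols c []
            if r < PySem.List.len col then acc ++ [PySem.List.pyGetD col r ' '] else acc)
          acc)
      []

-- ===== PRECONDITION & SPEC =====
-- Pre_ excludes only the empty keyword, on which A raises ZeroDivisionError (and B does too).
def Pre_columnar_keyword_decrypt (ct_text : String) (keyword : String) : Prop := keyword ≠ ""
instance (ct_text : String) (keyword : String) : Decidable (Pre_columnar_keyword_decrypt ct_text keyword) := by unfold Pre_columnar_keyword_decrypt; infer_instance
def pvWitness_columnar_keyword_decrypt : String × String := ("HELOWRD", "KEY")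

def Spec_columnar_keyword_decrypt (ct_text : String) (keyword : String) (out : String) : Prop := out = columnar_keyword_decrypt_alt ct_text keyword
instance (ct_text : String) (keyword : String) (out : String) : Decidable (Spec_columnar_keyword_decrypt ct_text keyword out) := by unfold Spec_columnar_keyword_decrypt; infer_instance

-- ===== CLAIM (what is proved, stated in full; the proofs are below) =====
def Claim_equal_columnar_keyword_decrypt : Prop := ∀ (ct_text : String) (keyword : String), Dom_columnar_keyword_decrypt ct_text keyword → Pre_columnar_keyword_decrypt ct_text keyword → Spec_columnar_keyword_decrypt ct_text keyword (columnar_keyword_decrypt ct_text keyword)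

-- ===== LEMMAS AND PROOFS =====

theorem sorted2_eq_sorted_lex {α κ₁ κ₂ : Type} [LinearOrder κ₁] [LinearOrder κ₂]
    (xs : List α) (k1 : α → κ₁) (k2 : α → κ₂) :
    PySem.List.sorted2 xs k1 k2 = PySem.List.sorted xs (fun x => toLex (k1 x, k2 x)) := by
  rw [PySem.List.sorted_eq_foldl_insertBy]
  unfold PySem.List.sorted2
  simp only []
  have hbe : (fun (a b : α) => decide (k1 a < k1 b) || !decide (k1 b < k1 a) && decide (k2 a < k2 b))
      = (fun a b => decide (toLex (k1 a, k2 a) < toLex (k1 b, k2 b))) := by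
    funext a b
    by_cases h1 : k1 a < k1 b
    · simp [h1, Prod.Lex.lt_iff, h1.not_gt]
    · by_cases h2 : k1 b < k1 a
      · simp [h1, h2, Prod.Lex.lt_iff, h2.ne']
      · have he : k1 a = k1 b := le_antisymm (not_lt.mp h2) (not_lt.mp h1)
        simp [h1, h2, Prod.Lex.lt_iff, he]
  rw [hbe]
  simp

theorem enumerate_getElem {α : Type} (xs : List α) (s : Int) (k : Nat) (hk : k < xs.length) :
    (PySem.List.enumerate xs s)[k]'(by
      induction xs generalizing s k with
      | nil => simp at hk
      | cons x t ih => simp [PySem.List.enumerate_cons] at hk ⊢; omega) = (s + k, xs[k]) := by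
  induction xs generalizing s k with
  | nil => simp at hk
  | cons x t ih =>
    cases k with
    | zero => simp [PySem.List.enumerate_cons]
    | succ m =>
      simp only [PySem.List.enumerate_cons, List.getElem_cons_succ]
      rw [ih (s+1) m (by simpa using hk)]
      congr 1
      push_cast
      ring

theorem enumerate_length {α : Type} (xs : List α) (s : Int) :
    (PySem.List.enumerate xs s).length = xs.length := by
  induction xs generalizing s with
  | nil => simp [PySem.List.enumerate]
  | cons x t ih => simp [PySem.List.enumerate_cons, ih]

-- indexed list of A = the range mapped through j ↦ (kw[j], j)
theorem indexed_eq (kw : List Char) :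
    (PySem.List.enumerate kw).map (fun p => (p.2, p.1))
      = (PySem.List.pyRange 0 (kw.length : Int)).map (fun j => (PySem.List.pyGetD kw j ' ', j)) := by
  apply List.ext_getElem
  · simp [enumerate_length, PySem.List.length_pyRange_one]
  · intro k h1 h2
    have hk : k < kw.length := by simpa [enumerate_length] using h1
    simp only [List.getElem_map]
    rw [enumerate_getElem kw 0 k hk, PySem.List.getElem_pyRange_one]
    simp [hk, List.getD_eq_getElem]

-- building the inverse: order[pos] = rank for (rank, pos) in enumerate(ps)
theorem build_inverse (ps : List Int) : ∀ (o₀ : List Int) (s : Int),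
    ps.Nodup → (∀ p ∈ ps, 0 ≤ p ∧ p < (o₀.length : Int)) →
    (((PySem.List.enumerate ps s).foldl (fun o q => PySem.List.pySetD o q.2 q.1) o₀).length = o₀.length
     ∧ (∀ j : Nat, (j : Int) ∉ ps →
         ((PySem.List.enumerate ps s).foldl (fun o q => PySem.List.pySetD o q.2 q.1) o₀).getD j 0 = o₀.getD j 0)
     ∧ (∀ k : Nat, ∀ hk : k < ps.length,
         ((PySem.List.enumerate ps s).foldl (fun o q => PySem.List.pySetD o q.2 q.1) o₀).getD (ps[k]).toNat 0 = s + k)) := by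
  induction ps with
  | nil => intro o₀ s _ _; simp [PySem.List.enumerate]
  | cons p t ih =>
    intro o₀ s hnd hmem
    have hp := hmem p (by simp)
    have hset : (PySem.List.pySetD o₀ p s) = o₀.set p.toNat s := PySem.List.pySetD_of_nonneg o₀ s hp.1
    have hlen : (o₀.set p.toNat s).length = o₀.length := by simp
    have ih' := ih (o₀.set p.toNat s) (s + 1) hnd.of_cons
      (fun q hq => by have := hmem q (by simp [hq]); omega)
    obtain ⟨ihl, ihu, ihs⟩ := ih'
    rw [PySem.List.enumerate_cons]
    simp only [List.foldl_cons, hset]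
    refine ⟨by rw [ihl, hlen], ?_, ?_⟩
    · intro j hj
      rw [ihu j (by intro h; exact hj (by simp [h]))]
      have hjp : (j : Int) ≠ p := by intro h; exact hj (by simp [h])
      simp only [List.getD_eq_getElem?_getD, List.getElem?_set]
      have : p.toNat ≠ j := by omega
      simp [this]
    · intro k hk
      cases k with
      | zero =>
        have hpt : (p : Int) ∉ t := (List.nodup_cons.mp hnd).1
        simp only [List.getElem_cons_zero]
        rw [ihu p.toNat (by simpa [Int.toNat_of_nonneg hp.1] using hpt)]
        simp only [List.getD_eq_getElem?_getD, List.getElem?_set]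
        have : p.toNat < o₀.length := by omega
        simp [this]
      | succ m =>
        have := ihs m (by simpa using hk)
        simp only [List.getElem_cons_succ]
        rw [this]; push_cast; ring

theorem enumerate_map {α β : Type} (f : α → β) (xs : List α) (s : Int) :
    PySem.List.enumerate (xs.map f) s = (PySem.List.enumerate xs s).map (fun q => (q.1, f q.2)) := by
  induction xs generalizing s with
  | nil => simp [PySem.List.enumerate]
  | cons x t ih => simp [PySem.List.enumerate_cons, ih]

def pvKw (keyword : String) : List Char := (PySem.Str.upper keyword).toList
def pvW (keyword : String) : Int := PySem.Str.len keyword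
def pvKey (keyword : String) (i : Int) : Lex (Char × Int) := toLex (PySem.List.pyGetD (pvKw keyword) i ' ', i)
def pvPerm (keyword : String) : List Int :=
  PySem.List.sorted2 (PySem.List.pyRange 0 (pvW keyword))
    (fun i => PySem.List.pyGetD (pvKw keyword) i ' ') (fun i => i)

theorem pvKw_length (keyword : String) : (pvKw keyword).length = keyword.toList.length := by
  simp [pvKw, PySem.Str.toList_upper, PySem.Chars.upper]

theorem pvW_eq (keyword : String) : pvW keyword = ((pvKw keyword).length : Int) := by
  simp [pvW, PySem.Str.len_eq, pvKw_length]

theorem pvPerm_eq_sorted (keyword : String) :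
    pvPerm keyword = PySem.List.sorted (PySem.List.pyRange 0 (pvW keyword)) (pvKey keyword) := by
  unfold pvPerm pvKey
  exact sorted2_eq_sorted_lex _ _ _

theorem pvPerm_perm (keyword : String) : (pvPerm keyword).Perm (PySem.List.pyRange 0 (pvW keyword)) := by
  rw [pvPerm_eq_sorted]; exact PySem.List.sorted_perm _ _ _

theorem pvPerm_nodup (keyword : String) : (pvPerm keyword).Nodup :=
  (pvPerm_perm keyword).nodup_iff.mpr (PySem.List.nodup_pyRange_one _ _)

theorem pvPerm_mem (keyword : String) (c : Int) : c ∈ pvPerm keyword ↔ 0 ≤ c ∧ c < pvW keyword := by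
  rw [(pvPerm_perm keyword).mem_iff, PySem.List.mem_pyRange_one]

theorem pvPerm_length (keyword : String) : (pvPerm keyword).length = (pvW keyword).toNat := by
  rw [(pvPerm_perm keyword).length_eq, PySem.List.length_pyRange_one]; simp

theorem pvKey_inj (keyword : String) : Function.Injective (pvKey keyword) := by
  intro a b h
  have := congrArg (fun x => (ofLex x).2) h
  simpa [pvKey] using this

theorem pvPerm_pairwise_lt (keyword : String) :
    (pvPerm keyword).Pairwise (fun a b => pvKey keyword a < pvKey keyword b) := by
  have h1 : (pvPerm keyword).Pairwise (fun a b => pvKey keyword a ≤ pvKey keyword b) := by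
    rw [pvPerm_eq_sorted]; exact PySem.List.sorted_pairwise _ _
  have h2 : (pvPerm keyword).Pairwise (fun a b => a ≠ b) := pvPerm_nodup keyword
  exact (h1.and h2).imp (fun {a b} ⟨hle, hne⟩ =>
    lt_of_le_of_ne hle (fun he => hne (pvKey_inj keyword he)))

-- A's "ranked" is B's perm mapped through j ↦ (kw[j], j)
theorem ranked_eq (keyword : String) :
    PySem.List.sorted2 ((PySem.List.enumerate (pvKw keyword)).map (fun p => (p.2, p.1)))
        (fun x => x.1) (fun x => x.2)
      = (pvPerm keyword).map (fun j => (PySem.List.pyGetD (pvKw keyword) j ' ', j)) := by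
  rw [sorted2_eq_sorted_lex]
  apply PySem.List.sorted_eq_of_perm_of_pairwise_lt
  · rw [indexed_eq, ← pvW_eq]
    exact (pvPerm_perm keyword).map _
  · rw [List.pairwise_map]
    exact (pvPerm_pairwise_lt keyword).imp (fun {a b} h => by simpa [pvKey] using h)

theorem col_order_eq_fold (keyword : String) :
    keyword_to_col_order keyword
      = (PySem.List.enumerate (pvPerm keyword)).foldl (fun o q => PySem.List.pySetD o q.2 q.1)
          (List.replicate (pvKw keyword).length (0 : Int)) := by
  unfold keyword_to_col_order
  simp only []
  rw [show (PySem.Str.upper keyword).toList = pvKw keyword from rfl, ranked_eq, enumerate_map,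
    List.foldl_map]

theorem col_order_spec (keyword : String) :
    (keyword_to_col_order keyword).length = (pvKw keyword).length
    ∧ (∀ k : Nat, ∀ hk : k < (pvPerm keyword).length,
        (keyword_to_col_order keyword).getD ((pvPerm keyword)[k]).toNat 0 = (k : Int)) := by
  rw [col_order_eq_fold]
  have h := build_inverse (pvPerm keyword) (List.replicate (pvKw keyword).length (0 : Int)) 0
    (pvPerm_nodup keyword)
    (fun p hp => by
      have := (pvPerm_mem keyword p).mp hp
      rw [List.length_replicate, ← pvW_eq]
      exact this)
  refine ⟨by simpa using h.1, fun k hk => by rw [h.2.2 k hk]; simp⟩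

theorem index?_col_order (keyword : String) (rank : Nat) (hk : rank < (pvPerm keyword).length) :
    PySem.List.index? (keyword_to_col_order keyword) ((rank : Int))
      = some ((pvPerm keyword)[rank]).toNat := by
  obtain ⟨hlen, hval⟩ := col_order_spec keyword
  have hmemr : (pvPerm keyword)[rank] ∈ pvPerm keyword := List.getElem_mem hk
  have hrb := (pvPerm_mem keyword _).mp hmemr
  have hwkw : (pvW keyword).toNat = (pvKw keyword).length := by rw [pvW_eq]; simp
  have hpos : ((pvPerm keyword)[rank]).toNat < (keyword_to_col_order keyword).length := by
    rw [hlen, ← hwkw]; omega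
  unfold PySem.List.index?
  rw [List.idxOf?_eq_some_iff]
  refine ⟨hpos, ?_, ?_⟩
  · have := hval rank hk
    rwa [List.getD_eq_getElem?_getD, List.getElem?_eq_getElem hpos, Option.getD_some] at this
  · intro j hj
    -- j < pvPerm[rank].toNat ≤ w, so j is some pvPerm[k'] with k' ≠ rank
    have hjw : (j : Int) < pvW keyword := by
      omega
    have hjmem : (j : Int) ∈ pvPerm keyword := (pvPerm_mem keyword _).mpr ⟨by omega, hjw⟩
    obtain ⟨k', hk', hkj⟩ := List.getElem_of_mem hjmem
    have hco : (keyword_to_col_order keyword).getD j 0 = (k' : Int) := by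
      have := hval k' hk'
      rwa [hkj, Int.toNat_natCast] at this
    have hjlen : j < (keyword_to_col_order keyword).length := by omega
    rw [show (keyword_to_col_order keyword)[j] =
        (keyword_to_col_order keyword).getD j 0 by
      rw [List.getD_eq_getElem?_getD, List.getElem?_eq_getElem hjlen, Option.getD_some], hco]
    intro hcontr
    have hk'rank : k' = rank := by exact_mod_cast hcontr
    subst hk'rank
    rw [hkj] at hj
    omega

def pvNrows (n w : Int) : Int := -(PySem.Int.floordiv (-n) w)
def pvRem (n w : Int) : Int := PySem.Int.mod n w
def pvL (n w c : Int) : Int :=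
  if (pvRem n w == 0) || c < pvRem n w then pvNrows n w else pvNrows n w - 1

theorem pvNrows_eq (n w q : Int) (hw : 0 < w) (h1 : (q-1)*w < n) (h2 : n ≤ q*w) :
    pvNrows n w = q :=
  (PySem.Int.neg_floordiv_neg_eq_iff_of_pos hw).mpr ⟨h1, h2⟩

theorem pvArith (n w : Int) (hw : 0 < w) (hn : 0 ≤ n) :
    (0 ≤ pvNrows n w) ∧ (∀ c, 0 ≤ pvL n w c)
    ∧ ((PySem.List.pyRange 0 w).map (pvL n w)).sum = n := by
  have hbr : (pvNrows n w - 1) * w < n ∧ n ≤ pvNrows n w * w :=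
    (PySem.Int.neg_floordiv_neg_eq_iff_of_pos hw).mp rfl
  have hnr0 : 0 ≤ pvNrows n w := by nlinarith [hbr.2]
  have hfd : PySem.Int.floordiv n w * w + pvRem n w = n := PySem.Int.floordiv_mul_add_mod n w
  have hrnn : 0 ≤ pvRem n w := PySem.Int.mod_nonneg n hw
  have hrlt : pvRem n w < w := PySem.Int.mod_lt n hw
  have hf0 : 0 ≤ PySem.Int.floordiv n w := by
    rw [PySem.Int.floordiv_eq_ediv_of_pos hw]
    exact Int.ediv_nonneg hn hw.le
  by_cases hr0 : pvRem n w = 0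
  · have hnrf : pvNrows n w = PySem.Int.floordiv n w := by
      apply pvNrows_eq n w _ hw <;> nlinarith
    refine ⟨hnr0, fun c => ?_, ?_⟩
    · unfold pvL; rw [hr0]; simp [hnr0]
    · have hmap : (PySem.List.pyRange 0 w).map (pvL n w)
          = (PySem.List.pyRange 0 w).map (fun _ => pvNrows n w) := by
        apply List.map_congr_left
        intro c _
        unfold pvL
        rw [hr0]; simp
      rw [hmap, PySem.List.sum_map_const_int, PySem.List.length_pyRange_one]
      have : ((w - 0).toNat : Int) = w := by omega
      rw [this, hnrf]
      nlinarith
  · have hnrf : pvNrows n w = PySem.Int.floordiv n w + 1 := by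
      apply pvNrows_eq n w _ hw
      · have : 0 < pvRem n w := lt_of_le_of_ne hrnn (Ne.symm hr0)
        nlinarith
      · nlinarith
    have hnr1 : 1 ≤ pvNrows n w := by rw [hnrf]; omega
    refine ⟨hnr0, fun c => ?_, ?_⟩
    · unfold pvL
      split
      · exact hnr0
      · omega
    · rw [PySem.List.pyRange_one_append 0 (pvRem n w) w hrnn hrlt.le, List.map_append,
        List.sum_append]
      have hmap1 : (PySem.List.pyRange 0 (pvRem n w)).map (pvL n w)
          = (PySem.List.pyRange 0 (pvRem n w)).map (fun _ => pvNrows n w) := by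
        apply List.map_congr_left
        intro c hc
        rw [PySem.List.mem_pyRange_one] at hc
        unfold pvL
        rw [if_pos (by simp; omega)]
      have hmap2 : (PySem.List.pyRange (pvRem n w) w).map (pvL n w)
          = (PySem.List.pyRange (pvRem n w) w).map (fun _ => pvNrows n w - 1) := by
        apply List.map_congr_left
        intro c hc
        rw [PySem.List.mem_pyRange_one] at hc
        unfold pvL
        rw [if_neg (by simp; omega)]
      rw [hmap1, hmap2, PySem.List.sum_map_const_int, PySem.List.sum_map_const_int,
        PySem.List.length_pyRange_one, PySem.List.length_pyRange_one]
      have e1 : (((pvRem n w) - 0).toNat : Int) = pvRem n w := by omega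
      have e2 : ((w - pvRem n w).toNat : Int) = w - pvRem n w := by omega
      rw [e1, e2, hnrf]
      nlinarith

theorem fillA_inner (ct_text : String) (c : Int) (k : Nat) (g : PySem.Dict (Int × Int) Char) (i : Int)
    (h0 : 0 ≤ i) (hk : i + k ≤ (ct_text.toList.length : Int)) :
    ((PySem.List.pyRange 0 (k : Int)).foldl
        (fun (st : PySem.Dict (Int × Int) Char × Int) r =>
          if st.2 < PySem.Str.len ct_text then
            (st.1.insert (r, c) ((PySem.Str.pyGet? ct_text st.2).getD ' '), st.2 + 1)
          else st)
        (g, i)).2 = i + k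
    ∧ ∀ r' c' : Int,
      ((PySem.List.pyRange 0 (k : Int)).foldl
        (fun (st : PySem.Dict (Int × Int) Char × Int) r =>
          if st.2 < PySem.Str.len ct_text then
            (st.1.insert (r, c) ((PySem.Str.pyGet? ct_text st.2).getD ' '), st.2 + 1)
          else st)
        (g, i)).1.get? (r', c')
      = if c' = c ∧ 0 ≤ r' ∧ r' < (k : Int) then some (ct_text.toList.getD (i + r').toNat ' ')
        else g.get? (r', c') := by
  induction k with
  | zero =>
    rw [show ((0 : Nat) : Int) = 0 by rfl, PySem.List.pyRange_one_eq_nil le_rfl]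
    simp only [List.foldl_nil]
    refine ⟨by omega, fun r' c' => ?_⟩
    rw [if_neg (by omega)]
  | succ m ih =>
    have hm : i + m ≤ (ct_text.toList.length : Int) := by push_cast at hk ⊢; omega
    obtain ⟨ih2, ih1⟩ := ih hm
    have hcast : ((m + 1 : Nat) : Int) = (m : Int) + 1 := by push_cast; ring
    rw [hcast, PySem.List.pyRange_one_succ_right (by omega), List.foldl_append]
    set res := (PySem.List.pyRange 0 (m : Int)).foldl
        (fun (st : PySem.Dict (Int × Int) Char × Int) r =>
          if st.2 < PySem.Str.len ct_text then
            (st.1.insert (r, c) ((PySem.Str.pyGet? ct_text st.2).getD ' '), st.2 + 1)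
          else st)
        (g, i) with hres
    have hguard : res.2 < PySem.Str.len ct_text := by
      rw [ih2, PySem.Str.len_eq]; push_cast at hk ⊢; omega
    simp only [List.foldl_cons, List.foldl_nil, if_pos hguard]
    have hidx : 0 ≤ i + (m : Int) ∧ i + (m : Int) < (ct_text.toList.length : Int) := by
      push_cast at hk ⊢; omega
    have hval : (PySem.Str.pyGet? ct_text res.2).getD ' '
        = ct_text.toList.getD (i + (m : Int)).toNat ' ' := by
      rw [ih2, show i + (m : Int) = (((i + (m : Int)).toNat : Nat) : Int) by omega,
        PySem.Str.pyGet?_natCast]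
      rw [List.getElem?_eq_getElem (by omega), Option.getD_some, List.getD_eq_getElem?_getD,
        List.getElem?_eq_getElem (by omega), Option.getD_some]
      simp only [Int.toNat_natCast]
    refine ⟨by simp [ih2]; ring, fun r' c' => ?_⟩
    by_cases hkey : r' = (m : Int) ∧ c' = c
    · obtain ⟨hr', hc'⟩ := hkey
      rw [hr', hc']
      rw [PySem.Dict.get?_insert_self,
        if_pos (show c = c ∧ 0 ≤ (m : Int) ∧ (m : Int) < (m : Int) + 1 from ⟨rfl, by omega, by omega⟩),
        hval]
    · have hne : (r', c') ≠ ((m : Int), c) := by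
        intro h
        exact hkey ⟨congrArg Prod.fst h, congrArg Prod.snd h⟩
      rw [PySem.Dict.get?_insert_of_ne _ _ hne, ih1 r' c']
      by_cases hcc : c' = c
      · subst hcc
        have hrm : r' ≠ (m : Int) := fun h => hkey ⟨h, rfl⟩
        by_cases hrlt : 0 ≤ r' ∧ r' < (m : Int)
        · rw [if_pos ⟨rfl, hrlt.1, hrlt.2⟩, if_pos ⟨rfl, hrlt.1, by omega⟩]
        · rw [if_neg (by omega), if_neg (by omega)]
      · rw [if_neg (by simp [hcc]), if_neg (by simp [hcc])]

theorem sliceB_get (ct_text : String) (i m : Int) (h0 : 0 ≤ i) (hm : 0 ≤ m)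
    (hend : i + m ≤ (ct_text.toList.length : Int)) (r : Int) (hr : 0 ≤ r) :
    PySem.List.pyGet? (PySem.List.slice ct_text.toList (some i) (some (i + m))) r
      = if r < m then some (ct_text.toList.getD (i + r).toNat ' ') else none := by
  rw [PySem.List.slice_toNat _ h0 (by omega)]
  have hcnt : (i + m).toNat - i.toNat = m.toNat := by omega
  rw [hcnt, PySem.List.pyGet?_of_nonneg _ hr]
  rw [List.getElem?_take, List.getElem?_drop]
  by_cases hlt : r < m
  · rw [if_pos (by omega), if_pos hlt, show i.toNat + r.toNat = (i + r).toNat from by omega,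
      List.getElem?_eq_getElem (by omega), List.getD_eq_getElem?_getD,
      List.getElem?_eq_getElem (by omega), Option.getD_some]
  · rw [if_neg (by omega), if_neg hlt]

def pvFA (ct_text : String) (w : Int) (st : PySem.Dict (Int × Int) Char × Int) (c : Int) :
    PySem.Dict (Int × Int) Char × Int :=
  (PySem.List.pyRange 0 (pvL (PySem.Str.len ct_text) w c)).foldl
    (fun st r =>
      if st.2 < PySem.Str.len ct_text then
        (st.1.insert (r, c) ((PySem.Str.pyGet? ct_text st.2).getD ' '), st.2 + 1)
      else st) st

def pvFB (ct_text : String) (w : Int) (st : List (List Char) × Int) (c : Int) :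
    List (List Char) × Int :=
  (PySem.List.pySetD st.1 c
      (PySem.List.slice ct_text.toList (some st.2) (some (st.2 + pvL (PySem.Str.len ct_text) w c))),
   st.2 + pvL (PySem.Str.len ct_text) w c)

theorem fill_loop (ct_text : String) (w : Int) (cs : List Int) :
    ∀ (g : PySem.Dict (Int × Int) Char) (cols : List (List Char)) (i : Int),
    0 ≤ i →
    (cs.map (pvL (PySem.Str.len ct_text) w)).sum = (ct_text.toList.length : Int) - i →
    (∀ c, 0 ≤ pvL (PySem.Str.len ct_text) w c) →
    cs.Nodup →
    (∀ c ∈ cs, 0 ≤ c ∧ c < w) →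
    cols.length = w.toNat →
    (∀ c ∈ cs, cols.getD c.toNat [] = [] ∧ ∀ r : Int, g.get? (r, c) = none) →
    (∀ r c : Int, 0 ≤ r → 0 ≤ c → c < w →
        g.get? (r, c) = PySem.List.pyGet? (cols.getD c.toNat []) r) →
    ((cs.foldl (pvFA ct_text w) (g, i)).2 = (cs.foldl (pvFB ct_text w) (cols, i)).2
     ∧ ∀ r c : Int, 0 ≤ r → 0 ≤ c → c < w →
        (cs.foldl (pvFA ct_text w) (g, i)).1.get? (r, c)
          = PySem.List.pyGet? ((cs.foldl (pvFB ct_text w) (cols, i)).1.getD c.toNat []) r) := by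
  induction cs with
  | nil =>
    intro g cols i _ _ _ _ _ _ _ hpt
    exact ⟨rfl, fun r c hr hc hcw => hpt r c hr hc hcw⟩
  | cons c rest ih =>
    intro g cols i hi hsum hL hnd hmem hlen hfresh hpt
    have hn := PySem.Str.len_eq ct_text
    set n : Int := (ct_text.toList.length : Int) with hndef
    set m : Int := pvL (PySem.Str.len ct_text) w c with hmdef
    have hm0 : 0 ≤ m := hL c
    have hrest_nonneg : 0 ≤ (rest.map (pvL (PySem.Str.len ct_text) w)).sum := by
      apply List.sum_nonneg
      intro x hx
      obtain ⟨y, _, rfl⟩ := List.mem_map.mp hx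
      exact hL y
    have hsum' : (rest.map (pvL (PySem.Str.len ct_text) w)).sum = n - (i + m) := by
      simp only [List.map_cons, List.sum_cons] at hsum
      omega
    have hend : i + m ≤ n := by omega
    have hcb := hmem c (by simp)
    -- characterize one A column step
    have hmcast : ((m.toNat : Nat) : Int) = m := by omega
    have hA := fillA_inner ct_text c m.toNat g i hi (by rw [hmcast]; exact hend)
    have hAfold : pvFA ct_text w (g, i) c
        = ((PySem.List.pyRange 0 ((m.toNat : Nat) : Int)).foldl
            (fun (st : PySem.Dict (Int × Int) Char × Int) r =>
              if st.2 < PySem.Str.len ct_text then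
                (st.1.insert (r, c) ((PySem.Str.pyGet? ct_text st.2).getD ' '), st.2 + 1)
              else st) (g, i)) := by
      unfold pvFA
      rw [hmcast, ← hmdef]
    have hA1 : (pvFA ct_text w (g, i) c).2 = i + m := by
      rw [hAfold, hA.1, hmcast]
    have hA2 : ∀ r' c' : Int, (pvFA ct_text w (g, i) c).1.get? (r', c')
        = if c' = c ∧ 0 ≤ r' ∧ r' < m then some (ct_text.toList.getD (i + r').toNat ' ')
          else g.get? (r', c') := by
      intro r' c'
      rw [hAfold, hA.2 r' c', hmcast]
    have hApair : pvFA ct_text w (g, i) c = ((pvFA ct_text w (g, i) c).1, i + m) := by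
      rw [← hA1]
    -- the B column step
    have hBfold : pvFB ct_text w (cols, i) c
        = (cols.set c.toNat (PySem.List.slice ct_text.toList (some i) (some (i + m))), i + m) := by
      unfold pvFB
      rw [← hmdef, PySem.List.pySetD_of_nonneg _ _ hcb.1]
    set cols' := cols.set c.toNat (PySem.List.slice ct_text.toList (some i) (some (i + m)))
      with hcols'
    have hclen' : cols'.length = w.toNat := by rw [hcols', List.length_set, hlen]
    have hcinr : c.toNat < cols.length := by rw [hlen]; omega
    have hgetc : cols'.getD c.toNat []
        = PySem.List.slice ct_text.toList (some i) (some (i + m)) := by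
      rw [hcols', List.getD_eq_getElem?_getD, List.getElem?_set_self (by omega), Option.getD_some]
    have hgetne : ∀ c' : Int, 0 ≤ c' → c' ≠ c → cols'.getD c'.toNat [] = cols.getD c'.toNat [] := by
      intro c' h0' hne
      rw [hcols', List.getD_eq_getElem?_getD, List.getElem?_set_ne (by omega),
        ← List.getD_eq_getElem?_getD]
    have hcnotin : c ∉ rest := (List.nodup_cons.mp hnd).1
    have hfresh_head := hfresh c (by simp)
    simp only [List.foldl_cons]
    rw [hBfold, hApair]
    apply ih (pvFA ct_text w (g, i) c).1 cols' (i + m) (by omega) hsum' hL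
      (List.nodup_cons.mp hnd).2 (fun c' hc' => hmem c' (by simp [hc'])) hclen'
    · -- freshness for the remaining columns
      intro c' hc'
      have hne : c' ≠ c := fun h => hcnotin (h ▸ hc')
      have hb := hmem c' (by simp [hc'])
      refine ⟨?_, ?_⟩
      · rw [hgetne c' hb.1 hne]
        exact (hfresh c' (by simp [hc'])).1
      · intro r
        rw [hA2 r c', if_neg (by simp [hne]), (hfresh c' (by simp [hc'])).2 r]
    · -- pointwise grid/cols agreement after this column
      intro r c' hr hc0 hcw
      by_cases hcc : c' = c
      · subst hcc
        rw [hA2 r c', hgetc, sliceB_get ct_text i m hi hm0 hend r hr]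
        by_cases hlt : r < m
        · rw [if_pos ⟨rfl, hr, hlt⟩, if_pos hlt]
        · rw [if_neg (by omega), if_neg hlt, hfresh_head.2 r]
      · rw [hA2 r c', if_neg (by simp [hcc]), hgetne c' hc0 hcc, hpt r c' hr hc0 hcw]

theorem getD_insert_fold (f : Int → Int) (ks : List Int) :
    ∀ (d : PySem.Dict Int Int) (c : Int),
      (ks.foldl (fun d c => d.insert c (f c)) d).getD c 0
        = if c ∈ ks then f c else d.getD c 0 := by
  induction ks with
  | nil => intro d c; simp
  | cons k t ih =>
    intro d c
    simp only [List.foldl_cons]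
    rw [ih]
    by_cases hct : c ∈ t
    · rw [if_pos hct, if_pos (by simp [hct])]
    · rw [if_neg hct]
      by_cases hck : c = k
      · subst hck
        unfold PySem.Dict.getD
        rw [PySem.Dict.get?_insert_self, if_pos (by simp)]
        rfl
      · unfold PySem.Dict.getD
        rw [PySem.Dict.get?_insert_of_ne _ _ hck, if_neg (by simp [hck, hct])]

theorem pvFB_length (ct_text : String) (w : Int) (cs : List Int) :
    ∀ st : List (List Char) × Int, (cs.foldl (pvFB ct_text w) st).1.length = st.1.length := by
  induction cs with
  | nil => intro st; rfl
  | cons c t ih =>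
    intro st
    simp only [List.foldl_cons]
    rw [ih]
    unfold pvFB
    exact PySem.List.length_pySetD _ _ _

theorem read_phase (grid : PySem.Dict (Int × Int) Char) (cols : List (List Char)) (w nrows : Int)
    (hpt : ∀ r c : Int, 0 ≤ r → 0 ≤ c → c < w →
      grid.get? (r, c) = PySem.List.pyGet? (cols.getD c.toNat []) r)
    (hlen : cols.length = w.toNat) :
    (PySem.List.pyRange 0 nrows).foldl
      (fun acc r =>
        (PySem.List.pyRange 0 w).foldl
          (fun acc c =>
            match grid.get? (r, c) with
            | some ch => acc ++ [ch]
            | none => acc) acc) []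
    = (PySem.List.pyRange 0 nrows).foldl
      (fun acc r =>
        (PySem.List.pyRange 0 w).foldl
          (fun acc c =>
            let col := PySem.List.pyGetD cols c []
            if r < PySem.List.len col then acc ++ [PySem.List.pyGetD col r ' '] else acc) acc) []
      := by
  apply PySem.List.foldl_congr_mem
  intro acc r hrmem
  rw [PySem.List.mem_pyRange_one] at hrmem
  apply PySem.List.foldl_congr_mem
  intro acc' c hcmem
  rw [PySem.List.mem_pyRange_one] at hcmem
  have hcol : PySem.List.pyGetD cols c [] = cols.getD c.toNat [] := by
    rw [PySem.List.pyGetD_eq_getElem cols [] hcmem.1 (by rw [hlen]; push_cast; omega),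
      List.getD_eq_getElem?_getD, List.getElem?_eq_getElem (by rw [hlen]; omega), Option.getD_some]
  rw [hpt r c hrmem.1 hcmem.1 hcmem.2]
  simp only [hcol]
  by_cases hlt : r < (PySem.List.len (cols.getD c.toNat []))
  · rw [PySem.List.len_eq] at hlt
    rw [PySem.List.pyGet?_of_nonneg _ hrmem.1, List.getElem?_eq_getElem (by omega)]
    rw [if_pos (by rw [PySem.List.len_eq]; exact_mod_cast hlt)]
    rw [PySem.List.pyGetD_eq_getElem _ ' ' hrmem.1 (by exact_mod_cast hlt)]
  · rw [PySem.List.len_eq] at hlt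
    rw [PySem.List.pyGet?_of_nonneg _ hrmem.1, List.getElem?_eq_none (by omega)]
    rw [if_neg (by rw [PySem.List.len_eq]; exact_mod_cast hlt)]

theorem toList_ne_nil (s : String) (h : s ≠ "") : s.toList ≠ [] := by
  intro hnil
  exact h (by
    have := congrArg String.ofList hnil
    simpa using this)

theorem colLens_eq (ct_text keyword : String) (c : Int) (h0 : 0 ≤ c)
    (hcw : c < PySem.Str.len keyword) :
    ((if (PySem.Int.mod (PySem.Str.len ct_text) (PySem.Str.len keyword) == 0) = true then
        (PySem.List.pyRange 0 (PySem.Str.len keyword)).foldl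
          (fun d c => d.insert c (-PySem.Int.floordiv (-PySem.Str.len ct_text) (PySem.Str.len keyword)))
          PySem.Dict.empty
      else
        (PySem.List.pyRange 0 (PySem.Str.len keyword)).foldl
          (fun d c => d.insert c
            (if c < PySem.Int.mod (PySem.Str.len ct_text) (PySem.Str.len keyword) then
              -PySem.Int.floordiv (-PySem.Str.len ct_text) (PySem.Str.len keyword)
            else -PySem.Int.floordiv (-PySem.Str.len ct_text) (PySem.Str.len keyword) - 1))
          PySem.Dict.empty) : PySem.Dict Int Int).getD c 0
      = pvL (PySem.Str.len ct_text) (PySem.Str.len keyword) c := by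
  have hmem : c ∈ PySem.List.pyRange 0 (PySem.Str.len keyword) :=
    (PySem.List.mem_pyRange_one).mpr ⟨h0, hcw⟩
  by_cases hr0 : (PySem.Int.mod (PySem.Str.len ct_text) (PySem.Str.len keyword) == 0) = true
  · rw [if_pos hr0, getD_insert_fold, if_pos hmem]
    unfold pvL pvRem pvNrows
    rw [if_pos (by simp_all)]
  · rw [if_neg hr0, getD_insert_fold, if_pos hmem]
    unfold pvL pvRem pvNrows
    by_cases hlt : c < PySem.Int.mod (PySem.Str.len ct_text) (PySem.Str.len keyword)
    · rw [if_pos hlt, if_pos (by simp_all)]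
    · rw [if_neg hlt, if_neg (by simp_all)]

theorem columnar_equiv (ct_text keyword : String) (hk : keyword ≠ "") :
    columnar_keyword_decrypt ct_text keyword = columnar_keyword_decrypt_alt ct_text keyword := by
  have hw : 0 < PySem.Str.len keyword := by
    rw [PySem.Str.len_eq]
    have := toList_ne_nil keyword hk
    cases h : keyword.toList with
    | nil => exact absurd h this
    | cons a t => simp [h]
  have hn : (0 : Int) ≤ PySem.Str.len ct_text := by rw [PySem.Str.len_eq]; positivity
  have hweq : pvW keyword = PySem.Str.len keyword := rfl
  obtain ⟨hnr0, hL0, hsum_range⟩ := pvArith (PySem.Str.len ct_text) (PySem.Str.len keyword) hw hn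
  have hsum_pm : ((pvPerm keyword).map (pvL (PySem.Str.len ct_text) (PySem.Str.len keyword))).sum
      = (ct_text.toList.length : Int) - 0 := by
    rw [List.Perm.sum_eq ((pvPerm_perm keyword).map _)]
    rw [hweq, hsum_range, PySem.Str.len_eq]
    ring
  have hpmmem : ∀ c ∈ pvPerm keyword, 0 ≤ c ∧ c < PySem.Str.len keyword := by
    intro c hc
    have := (pvPerm_mem keyword c).mp hc
    rwa [hweq] at this
  have key := fill_loop ct_text (PySem.Str.len keyword) (pvPerm keyword)
    PySem.Dict.empty (List.replicate (PySem.Str.len keyword).toNat []) 0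
    le_rfl hsum_pm hL0 (pvPerm_nodup keyword) hpmmem
    (by simp)
    (by
      intro c hc
      refine ⟨?_, fun r => PySem.Dict.get?_empty _⟩
      rw [List.getD_eq_getElem?_getD, List.getElem?_replicate]
      split <;> rfl)
    (by
      intro r c hr hc hcw
      rw [PySem.Dict.get?_empty, PySem.List.pyGet?_of_nonneg _ hr]
      have hrepl : (List.replicate (PySem.Str.len keyword).toNat ([] : List Char)).getD c.toNat []
          = ([] : List Char) := by
        rw [List.getD_eq_getElem?_getD, List.getElem?_replicate]
        split <;> rfl
      rw [hrepl]
      simp)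
  -- rewrite A's rank loop into a fold of pvFA over the permutation
  have hA : (PySem.List.pyRange 0 (PySem.Str.len keyword)).foldl
      (fun (st : PySem.Dict (Int × Int) Char × Int) rank =>
        match PySem.List.index? (keyword_to_col_order keyword) rank with
        | none => st
        | some colIdx =>
          (PySem.List.pyRange 0
            ((if (PySem.Int.mod (PySem.Str.len ct_text) (PySem.Str.len keyword) == 0) = true then
                (PySem.List.pyRange 0 (PySem.Str.len keyword)).foldl
                  (fun d c => d.insert c (-PySem.Int.floordiv (-PySem.Str.len ct_text) (PySem.Str.len keyword)))
                  PySem.Dict.empty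
              else
                (PySem.List.pyRange 0 (PySem.Str.len keyword)).foldl
                  (fun d c => d.insert c
                    (if c < PySem.Int.mod (PySem.Str.len ct_text) (PySem.Str.len keyword) then
                      -PySem.Int.floordiv (-PySem.Str.len ct_text) (PySem.Str.len keyword)
                    else -PySem.Int.floordiv (-PySem.Str.len ct_text) (PySem.Str.len keyword) - 1))
                  PySem.Dict.empty).getD (colIdx : Int) 0)).foldl
            (fun st r =>
              if st.2 < PySem.Str.len ct_text then
                (st.1.insert (r, (colIdx : Int)) ((PySem.Str.pyGet? ct_text st.2).getD ' '), st.2 + 1)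
              else st) st)
      (PySem.Dict.empty, 0)
      = (pvPerm keyword).foldl (pvFA ct_text (PySem.Str.len keyword)) (PySem.Dict.empty, 0) := by
    rw [PySem.List.foldl_congr_mem _ _
      (fun (st : PySem.Dict (Int × Int) Char × Int) rank =>
        pvFA ct_text (PySem.Str.len keyword) st (PySem.List.pyGetD (pvPerm keyword) rank 0)) _ ?_]
    · have hlenpm : PySem.List.len (pvPerm keyword) = PySem.Str.len keyword := by
        rw [PySem.List.len_eq, pvPerm_length, hweq]
        omega
      conv_rhs => rw [← PySem.List.map_pyGetD_pyRange_zero (pvPerm keyword) 0]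
      rw [List.foldl_map, hlenpm]
    · intro st rank hrank
      rw [PySem.List.mem_pyRange_one] at hrank
      have hrtn : rank.toNat < (pvPerm keyword).length := by
        rw [pvPerm_length, hweq]
        omega
      have hidx := index?_col_order keyword rank.toNat hrtn
      have hpmem : (pvPerm keyword)[rank.toNat] ∈ pvPerm keyword := List.getElem_mem hrtn
      have hpb := hpmmem _ hpmem
      have hcast : (((pvPerm keyword)[rank.toNat]).toNat : Int) = (pvPerm keyword)[rank.toNat] := by
        have := hpb.1
        omega
      rw [show rank = ((rank.toNat : Nat) : Int) by omega, hidx]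
      simp only []
      rw [PySem.List.pyGetD_eq_getElem (pvPerm keyword) 0 (by omega)
        (by rw [pvPerm_length, hweq]; push_cast; omega)]
      simp only [Int.toNat_natCast, hcast]
      rw [colLens_eq ct_text keyword _ hpb.1 hpb.2]
      rfl
  unfold columnar_keyword_decrypt columnar_keyword_decrypt_alt
  simp only []
  refine congrArg String.ofList (read_phase _ _ (PySem.Str.len keyword)
    (-PySem.Int.floordiv (-PySem.Str.len ct_text) (PySem.Str.len keyword)) ?_ ?_)
  · intro r c hr hc hcw
    rw [hA]
    exact key.2 r c hr hc hcw
  · show (List.foldl (pvFB ct_text (PySem.Str.len keyword))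
        (List.replicate (PySem.Str.len keyword).toNat ([] : List Char), 0) (pvPerm keyword)).1.length = _
    rw [pvFB_length]
    simp

-- ===== VERDICT (by name: the statement is the Claim_ definition above) =====
theorem columnar_keyword_decrypt_spec : Claim_equal_columnar_keyword_decrypt := by
  intro ct keyword _ hpre
  unfold Spec_columnar_keyword_decrypt
  exact columnar_equiv ct keyword hpre
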